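-- pv_equiv track=rewrite | github.com/Drelios/Hairpin_Checker | hairpin.py | check_dot_bracket
-- ===== SOURCE A (Python) =====
-- def check_dot_bracket(string, threshold, gap_authorized):
--     count = 0
--     gap_count = 0
--     for char in string:
--         if char == '(':
--             count += 1
--             if count > threshold and gap_count <= gap_authorized:
--                 return "True"
--             gap_count = 0
--         elif char == ')':
--             count = 0
--             gap_count = 0
--         else:
--             if count > 0 and count <= threshold:
--                 gap_count += 1
--                 if gap_count > gap_authorized:
--                     count = 0
--                     gap_count = 0
--             else:
--                 count = 0
--                 gap_count = 0
--     return "False"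
-- ===== SOURCE B (Python) =====
-- def check_dot_bracket(string, threshold, gap_authorized):
--     # Different approach: split the structure on ')' (which always resets the
--     # original scan), list the '(' positions of each piece, and look for a
--     # window of consecutive '(' positions whose pairwise gaps are small enough.
--     if gap_authorized < 0:
--         return "False"
--     for segment in string.split(')'):
--         positions = [i for i, c in enumerate(segment) if c == '(']
--         run = 0
--         prev = None
--         for p in positions:
--             run = run + 1 if prev is not None and p - prev - 1 <= gap_authorized else 1
--             prev = p
--             if run > threshold:
--                 return "True"
--     return "False"
-- ===== Notes on version B (the rewrite author's own statement) =====
-- stated objective: alternative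
-- what changed: Replaces A's single-pass count/gap state machine with a decomposition: split the string on ')' (which always resets A's scan), list the '(' positions of each piece, and scan those positions for a run of threshold+1 with consecutive gaps at most gap_authorized; negative gap_authorized short-circuits to "False".
import Mathlib
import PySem

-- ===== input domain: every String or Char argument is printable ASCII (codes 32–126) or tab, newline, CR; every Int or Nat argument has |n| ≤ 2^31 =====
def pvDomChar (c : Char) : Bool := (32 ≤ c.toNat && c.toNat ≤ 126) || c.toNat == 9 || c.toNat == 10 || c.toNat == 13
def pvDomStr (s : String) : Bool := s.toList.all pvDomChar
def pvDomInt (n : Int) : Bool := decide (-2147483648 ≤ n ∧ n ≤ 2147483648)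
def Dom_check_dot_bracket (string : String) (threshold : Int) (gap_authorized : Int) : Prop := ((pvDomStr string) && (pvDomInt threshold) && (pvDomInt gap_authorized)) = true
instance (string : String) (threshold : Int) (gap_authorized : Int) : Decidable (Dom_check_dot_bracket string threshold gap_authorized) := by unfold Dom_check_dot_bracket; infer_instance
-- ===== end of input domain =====

-- B replaces A's single-pass count/gap state machine by a decomposition: split on ')',
-- collect '(' positions per piece, and scan the positions for a long-enough run (objective: alternative).

-- ===== PORT A =====
-- the for-loop of A, with early return; state = (count, gap_count)
def checkAGo (threshold gap_authorized : Int) : List Char → Int → Int → String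
  | [], _, _ => "False"
  | char :: rest, count, gap_count =>
    if char = '(' then
      if count + 1 > threshold ∧ gap_count ≤ gap_authorized then "True"
      else checkAGo threshold gap_authorized rest (count + 1) 0
    else if char = ')' then
      checkAGo threshold gap_authorized rest 0 0
    else
      if 0 < count ∧ count ≤ threshold then
        if gap_count + 1 > gap_authorized then checkAGo threshold gap_authorized rest 0 0
        else checkAGo threshold gap_authorized rest count (gap_count + 1)
      else checkAGo threshold gap_authorized rest 0 0

def check_dot_bracket (string : String) (threshold : Int) (gap_authorized : Int) : String :=
  checkAGo threshold gap_authorized string.toList 0 0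

-- ===== PORT B =====
-- string.split(')') ported by hand (exact for a one-character separator: every
-- occurrence splits, empty pieces kept); returns (first piece, later pieces).
def pvSplitClose : List Char → List Char × List (List Char)
  | [] => ([], [])
  | c :: rest =>
    let p := pvSplitClose rest
    if c = ')' then ([], p.1 :: p.2) else (c :: p.1, p.2)

-- [i for i, c in enumerate(segment) if c == '(']
def pvPositions (seg : List Char) : List Int :=
  (PySem.List.enumerate seg).filterMap (fun ic => if ic.2 = '(' then some ic.1 else none)

-- the inner for-loop of B, with early return; state = (run, prev)
def pvRunScan (threshold gap_authorized : Int) : List Int → Int → Option Int → Bool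
  | [], _, _ => false
  | p :: ps, run, prev =>
    let run' := match prev with
      | some q => if p - q - 1 ≤ gap_authorized then run + 1 else 1
      | none => 1
    if run' > threshold then true else pvRunScan threshold gap_authorized ps run' (some p)

def check_dot_bracket_alt (string : String) (threshold : Int) (gap_authorized : Int) : String :=
  if gap_authorized < 0 then "False"
  else
    let p := pvSplitClose string.toList
    if (p.1 :: p.2).any (fun seg => pvRunScan threshold gap_authorized (pvPositions seg) 0 none)
    then "True" else "False"

-- ===== PRECONDITION & SPEC =====
def Spec_check_dot_bracket (string : String) (threshold : Int) (gap_authorized : Int) (out : String) : Prop := out = check_dot_bracket_alt string threshold gap_authorized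
instance (string : String) (threshold : Int) (gap_authorized : Int) (out : String) : Decidable (Spec_check_dot_bracket string threshold gap_authorized out) := by unfold Spec_check_dot_bracket; infer_instance

-- ===== CLAIM (what is proved, stated in full; the proofs are below) =====
def Claim_equal_check_dot_bracket : Prop := ∀ (string : String) (threshold : Int) (gap_authorized : Int), Dom_check_dot_bracket string threshold gap_authorized → Spec_check_dot_bracket string threshold gap_authorized (check_dot_bracket string threshold gap_authorized)

-- ===== LEMMAS AND PROOFS =====

-- step lemmas for A's loop
lemma checkAGo_open (θ g c gp : Int) (rest : List Char) :
    checkAGo θ g ('(' :: rest) c gp =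
      if c + 1 > θ ∧ gp ≤ g then "True" else checkAGo θ g rest (c + 1) 0 := by
  simp [checkAGo]

lemma checkAGo_close (θ g c gp : Int) (rest : List Char) :
    checkAGo θ g (')' :: rest) c gp = checkAGo θ g rest 0 0 := by
  simp [checkAGo]

lemma checkAGo_other (θ g c gp : Int) (ch : Char) (rest : List Char)
    (h1 : ch ≠ '(') (h2 : ch ≠ ')') :
    checkAGo θ g (ch :: rest) c gp =
      if 0 < c ∧ c ≤ θ then
        (if gp + 1 > g then checkAGo θ g rest 0 0 else checkAGo θ g rest c (gp + 1))
      else checkAGo θ g rest 0 0 := by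
  simp [checkAGo, h1, h2]

-- step lemmas for the hand-ported split
lemma splitClose_fst_close (rest : List Char) : (pvSplitClose (')' :: rest)).1 = [] := by
  simp [pvSplitClose]

lemma splitClose_snd_close (rest : List Char) :
    (pvSplitClose (')' :: rest)).2 = (pvSplitClose rest).1 :: (pvSplitClose rest).2 := by
  simp [pvSplitClose]

lemma splitClose_fst_other (ch : Char) (rest : List Char) (h : ch ≠ ')') :
    (pvSplitClose (ch :: rest)).1 = ch :: (pvSplitClose rest).1 := by
  simp [pvSplitClose, h]

lemma splitClose_snd_other (ch : Char) (rest : List Char) (h : ch ≠ ')') :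
    (pvSplitClose (ch :: rest)).2 = (pvSplitClose rest).2 := by
  simp [pvSplitClose, h]

-- '(' positions of a segment, head-recursively (proof-side restatement of pvPositions)
def posRec : List Char → List Int
  | [] => []
  | c :: rest => if c = '(' then 0 :: (posRec rest).map (· + 1) else (posRec rest).map (· + 1)

lemma posRec_open (rest : List Char) :
    posRec ('(' :: rest) = 0 :: (posRec rest).map (· + 1) := by
  simp [posRec]

lemma posRec_other (ch : Char) (rest : List Char) (h : ch ≠ '(') :
    posRec (ch :: rest) = (posRec rest).map (· + 1) := by
  simp [posRec, h]

lemma positions_eq_aux : ∀ (seg : List Char) (s : Int),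
    (PySem.List.enumerate seg s).filterMap (fun ic => if ic.2 = '(' then some ic.1 else none)
      = (posRec seg).map (· + s) := by
  intro seg
  induction seg with
  | nil => intro s; simp [posRec, PySem.List.enumerate_nil]
  | cons c rest ih =>
    intro s
    rw [PySem.List.enumerate_cons, List.filterMap_cons]
    by_cases hc : c = '('
    · subst hc
      rw [posRec_open]
      simp only [ih (s + 1), List.map_cons]
      simp only [reduceIte]
      refine congrArg₂ _ (by omega) ?_
      rw [List.map_map]
      refine List.map_congr_left ?_
      intro x _; simp [Function.comp]; omega
    · rw [posRec_other c rest hc]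
      simp [hc, ih (s + 1)]
      all_goals (intro a _; ring)

lemma positions_eq (seg : List Char) : pvPositions seg = posRec seg := by
  have h := positions_eq_aux seg 0
  simpa [pvPositions] using h

-- step lemmas for B's scan
lemma runScan_cons_none (θ g p : Int) (ps : List Int) (run : Int) :
    pvRunScan θ g (p :: ps) run none =
      if (1 : Int) > θ then true else pvRunScan θ g ps 1 (some p) := rfl

lemma runScan_cons_some (θ g p q : Int) (ps : List Int) (run : Int) :
    pvRunScan θ g (p :: ps) run (some q) =
      if (if p - q - 1 ≤ g then run + 1 else 1) > θ then true
      else pvRunScan θ g ps (if p - q - 1 ≤ g then run + 1 else 1) (some p) := rfl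

-- shifting every position (and prev) by one does not change the scan
lemma runScan_shift (θ g d : Int) : ∀ (ps : List Int) (run : Int) (prev : Option Int),
    pvRunScan θ g (ps.map (· + d)) run (prev.map (· + d)) = pvRunScan θ g ps run prev := by
  intro ps
  induction ps with
  | nil => intro run prev; simp [pvRunScan]
  | cons p ps ih =>
    intro run prev
    cases prev with
    | none =>
      simp only [List.map_cons, Option.map_none, pvRunScan]
      split_ifs with h
      · rfl
      · exact ih 1 (some p)
    | some q =>
      simp only [List.map_cons, Option.map_some, pvRunScan]
      have hq : p + d - (q + d) - 1 = p - q - 1 := by ring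
      rw [hq]
      split_ifs with h1 h2 h2
      · rfl
      · exact ih (run + 1) (some p)
      · rfl
      · exact ih 1 (some p)

lemma runScan_shift1_none (θ g : Int) (ps : List Int) (run : Int) :
    pvRunScan θ g (ps.map (· + 1)) run none = pvRunScan θ g ps run none := by
  have h := runScan_shift θ g 1 ps run none
  simpa using h

lemma runScan_shift1_some (θ g : Int) (ps : List Int) (run q : Int) :
    pvRunScan θ g (ps.map (· + 1)) run (some q) = pvRunScan θ g ps run (some (q - 1)) := by
  have h := runScan_shift θ g 1 ps run (some (q - 1))
  simp only [Option.map_some] at h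
  rw [show q - 1 + 1 = q by ring] at h
  exact h

-- the invariant tying A's state (count, gap_count) to B's state (run, prev)
def AInv (θ g c gp run : Int) (prev : Option Int) : Prop :=
  (c = 0 ∧ gp = 0 ∧ (prev = none ∨ ∃ q, prev = some q ∧ g < -q - 1))
  ∨ (1 ≤ c ∧ c ≤ θ ∧ run = c ∧ 0 ≤ gp ∧ gp ≤ g ∧ prev = some (-gp - 1))

lemma main_equiv (θ g : Int) (hg : 0 ≤ g) : ∀ (l : List Char) (c gp run : Int) (prev : Option Int),
    AInv θ g c gp run prev →
    checkAGo θ g l c gp =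
      (if (pvRunScan θ g (posRec (pvSplitClose l).1) run prev
            || (pvSplitClose l).2.any (fun s => pvRunScan θ g (posRec s) 0 none))
       then "True" else "False") := by
  intro l
  induction l with
  | nil =>
    intro c gp run prev _
    simp [checkAGo, pvSplitClose, posRec, pvRunScan]
  | cons ch rest ih =>
    intro c gp run prev hinv
    by_cases hpar : ch = '('
    · subst hpar
      rw [splitClose_fst_other '(' rest (by decide), splitClose_snd_other '(' rest (by decide),
        posRec_open, checkAGo_open]
      rcases hinv with ⟨hc, hgp, hprev | ⟨q, hprev, hqg⟩⟩ | ⟨hc1, hcθ, hrun, hgp0, hgpg, hprev⟩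
      · subst hprev
        rw [runScan_cons_none]
        by_cases hret : c + 1 > θ
        · rw [if_pos ⟨hret, by omega⟩, if_pos (show (1 : Int) > θ by omega)]
          simp
        · rw [if_neg (by tauto), if_neg (show ¬((1 : Int) > θ) by omega),
            runScan_shift1_some]
          exact ih (c + 1) 0 1 (some (0 - 1))
            (Or.inr ⟨by omega, by omega, by omega, le_refl 0, hg, by norm_num⟩)
      · subst hprev
        rw [runScan_cons_some, if_neg (show ¬((0 : Int) - q - 1 ≤ g) by omega)]
        by_cases hret : c + 1 > θ
        · rw [if_pos ⟨hret, by omega⟩, if_pos (show (1 : Int) > θ by omega)]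
          simp
        · rw [if_neg (by tauto), if_neg (show ¬((1 : Int) > θ) by omega),
            runScan_shift1_some]
          exact ih (c + 1) 0 1 (some (0 - 1))
            (Or.inr ⟨by omega, by omega, by omega, le_refl 0, hg, by norm_num⟩)
      · subst hprev
        rw [runScan_cons_some, if_pos (show (0 : Int) - (-gp - 1) - 1 ≤ g by omega)]
        by_cases hret : c + 1 > θ
        · rw [if_pos ⟨hret, hgpg⟩, if_pos (show run + 1 > θ by omega)]
          simp
        · rw [if_neg (by tauto), if_neg (show ¬(run + 1 > θ) by omega),
            runScan_shift1_some]
          exact ih (c + 1) 0 (run + 1) (some (0 - 1))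
            (Or.inr ⟨by omega, by omega, by omega, le_refl 0, hg, by norm_num⟩)
    · by_cases hclose : ch = ')'
      · subst hclose
        rw [splitClose_fst_close, splitClose_snd_close, checkAGo_close]
        simp only [posRec, pvRunScan, List.any_cons, Bool.false_or]
        exact ih 0 0 0 none (Or.inl ⟨rfl, rfl, Or.inl rfl⟩)
      · rw [splitClose_fst_other ch rest hclose, splitClose_snd_other ch rest hclose,
          posRec_other ch (pvSplitClose rest).1 hpar, checkAGo_other θ g c gp ch rest hpar hclose]
        rcases hinv with ⟨hc, hgp, hprev | ⟨q, hprev, hqg⟩⟩ | ⟨hc1, hcθ, hrun, hgp0, hgpg, hprev⟩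
        · subst hprev
          rw [runScan_shift1_none, if_neg (by omega)]
          exact ih 0 0 run none (Or.inl ⟨rfl, rfl, Or.inl rfl⟩)
        · subst hprev
          rw [runScan_shift1_some, if_neg (by omega)]
          exact ih 0 0 run (some (q - 1)) (Or.inl ⟨rfl, rfl, Or.inr ⟨q - 1, rfl, by omega⟩⟩)
        · subst hprev
          rw [runScan_shift1_some, if_pos ⟨by omega, hcθ⟩]
          by_cases hover : gp + 1 > g
          · rw [if_pos hover]
            exact ih 0 0 run (some (-gp - 1 - 1))
              (Or.inl ⟨rfl, rfl, Or.inr ⟨-gp - 1 - 1, rfl, by omega⟩⟩)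
          · rw [if_neg hover]
            exact ih c (gp + 1) run (some (-gp - 1 - 1))
              (Or.inr ⟨hc1, hcθ, hrun, by omega, by omega, congrArg some (by ring)⟩)

lemma neg_g_false (θ g : Int) (hg : g < 0) : ∀ (l : List Char) (c gp : Int), 0 ≤ gp →
    checkAGo θ g l c gp = "False" := by
  intro l
  induction l with
  | nil => intro c gp _; rfl
  | cons ch rest ih =>
    intro c gp hgp
    by_cases hpar : ch = '('
    · subst hpar
      rw [checkAGo_open, if_neg (by omega)]
      exact ih _ _ (le_refl 0)
    · by_cases hclose : ch = ')'
      · subst hclose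
        rw [checkAGo_close]
        exact ih _ _ (le_refl 0)
      · rw [checkAGo_other θ g c gp ch rest hpar hclose]
        split_ifs
        · exact ih _ _ (le_refl 0)
        · exact ih _ _ (by omega)
        · exact ih _ _ (le_refl 0)

-- ===== VERDICT (by name: the statement is the Claim_ definition above) =====
theorem check_dot_bracket_spec : Claim_equal_check_dot_bracket := by
  intro s θ g _
  unfold Spec_check_dot_bracket check_dot_bracket check_dot_bracket_alt
  by_cases hg : g < 0
  · rw [if_pos hg]
    exact neg_g_false θ g hg s.toList 0 0 (le_refl 0)
  · rw [if_neg hg]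
    have h := main_equiv θ g (by omega) s.toList 0 0 0 none (Or.inl ⟨rfl, rfl, Or.inl rfl⟩)
    rw [h]
    simp only [List.any_cons, positions_eq]
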